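-- pv_equiv track=rewrite | github.com/Bokai502/freecad-skill | freecad_cli_tools/src/freecad_cli_tools/geometry.py | rotation_about_axis
-- ===== SOURCE A (Python) =====
-- IDENTITY_ROTATION = [
--     [1, 0, 0],
--     [0, 1, 0],
--     [0, 0, 1],
-- ]
--
-- def multiply_rotation_matrices(
--     left: list[list[int]], right: list[list[int]]
-- ) -> list[list[int]]:
--     return [
--         [sum(left[row][k] * right[k][col] for k in range(3)) for col in range(3)]
--         for row in range(3)
--     ]
--
-- def rotation_about_axis(axis_index: int, quarter_turns: int) -> list[list[int]]:
--     """Return a right-handed quarter-turn rotation matrix around a world axis."""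
--     turns = quarter_turns % 4
--     if turns == 0:
--         return [row[:] for row in IDENTITY_ROTATION]
--
--     if axis_index == 0:
--         step = [[1, 0, 0], [0, 0, -1], [0, 1, 0]]
--     elif axis_index == 1:
--         step = [[0, 0, 1], [0, 1, 0], [-1, 0, 0]]
--     elif axis_index == 2:
--         step = [[0, -1, 0], [1, 0, 0], [0, 0, 1]]
--     else:
--         raise ValueError(f"Invalid rotation axis index {axis_index!r}.")
--
--     result = [row[:] for row in IDENTITY_ROTATION]
--     for _ in range(turns):
--         result = multiply_rotation_matrices(step, result)
--     return result
-- ===== SOURCE B (Python) =====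
-- def rotation_about_axis(axis_index: int, quarter_turns: int) -> list[list[int]]:
--     """Return a right-handed quarter-turn rotation matrix around a world axis."""
--     turns = quarter_turns % 4
--     if turns == 0:
--         return [[1, 0, 0], [0, 1, 0], [0, 0, 1]]
--     c = (1, 0, -1, 0)[turns]
--     s = (0, 1, 0, -1)[turns]
--     if axis_index == 0:
--         return [[1, 0, 0], [0, c, -s], [0, s, c]]
--     if axis_index == 1:
--         return [[c, 0, s], [0, 1, 0], [-s, 0, c]]
--     if axis_index == 2:
--         return [[c, -s, 0], [s, c, 0], [0, 0, 1]]
--     raise ValueError(f"Invalid rotation axis index {axis_index!r}.")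
-- ===== Notes on version B (the rewrite author's own statement) =====
-- stated objective: simpler
-- what changed: Replaces A's repeated 3x3 matrix multiplication loop (turns iterations of a generic multiply helper) with a direct closed-form matrix built from integer cos/sin lookup tables per axis.
import Mathlib
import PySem

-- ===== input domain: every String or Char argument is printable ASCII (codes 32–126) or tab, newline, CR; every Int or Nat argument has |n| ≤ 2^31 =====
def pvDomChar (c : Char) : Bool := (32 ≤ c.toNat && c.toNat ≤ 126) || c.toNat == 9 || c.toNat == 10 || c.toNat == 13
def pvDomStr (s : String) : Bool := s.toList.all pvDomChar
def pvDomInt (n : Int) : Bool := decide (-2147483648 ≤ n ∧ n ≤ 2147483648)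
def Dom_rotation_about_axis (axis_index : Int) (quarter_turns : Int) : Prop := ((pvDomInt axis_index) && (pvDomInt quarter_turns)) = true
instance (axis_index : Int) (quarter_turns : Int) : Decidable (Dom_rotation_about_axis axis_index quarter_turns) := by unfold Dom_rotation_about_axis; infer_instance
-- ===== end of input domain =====

-- B replaces A's iterated matrix-multiplication loop by a closed-form matrix built from
-- integer cos/sin tables (objective: simpler; same exact results).

-- ===== PORT A =====
def identityRot : List (List Int) := [[1, 0, 0], [0, 1, 0], [0, 0, 1]]

-- multiply_rotation_matrices: nested comprehensions over range(3)
def multiplyRotationMatrices (left right : List (List Int)) : List (List Int) :=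
  (PySem.List.pyRange 0 3 1).map (fun row =>
    (PySem.List.pyRange 0 3 1).map (fun col =>
      ((PySem.List.pyRange 0 3 1).map (fun k =>
        PySem.List.pyGetD (PySem.List.pyGetD left row []) k 0 *
        PySem.List.pyGetD (PySem.List.pyGetD right k []) col 0)).sum))

def rotation_about_axis (axis_index : Int) (quarter_turns : Int) : List (List Int) :=
  let turns := PySem.Int.mod quarter_turns 4
  if turns == 0 then
    identityRot.map (fun row => PySem.List.slice row none none)  -- [row[:] for row in IDENTITY_ROTATION]
  else if axis_index == 0 then
    (PySem.List.pyRange 0 turns 1).foldl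
      (fun result _ => multiplyRotationMatrices [[1, 0, 0], [0, 0, -1], [0, 1, 0]] result)
      (identityRot.map (fun row => PySem.List.slice row none none))
  else if axis_index == 1 then
    (PySem.List.pyRange 0 turns 1).foldl
      (fun result _ => multiplyRotationMatrices [[0, 0, 1], [0, 1, 0], [-1, 0, 0]] result)
      (identityRot.map (fun row => PySem.List.slice row none none))
  else if axis_index == 2 then
    (PySem.List.pyRange 0 turns 1).foldl
      (fun result _ => multiplyRotationMatrices [[0, -1, 0], [1, 0, 0], [0, 0, 1]] result)
      (identityRot.map (fun row => PySem.List.slice row none none))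
  else
    []  -- Python raises ValueError here; excluded by Pre_

-- ===== PORT B =====
def rotation_about_axis_alt (axis_index : Int) (quarter_turns : Int) : List (List Int) :=
  let turns := PySem.Int.mod quarter_turns 4
  if turns == 0 then
    [[1, 0, 0], [0, 1, 0], [0, 0, 1]]
  else
    let c := PySem.List.pyGetD [1, 0, -1, 0] turns 0
    let s := PySem.List.pyGetD [0, 1, 0, -1] turns 0
    if axis_index == 0 then [[1, 0, 0], [0, c, -s], [0, s, c]]
    else if axis_index == 1 then [[c, 0, s], [0, 1, 0], [-s, 0, c]]
    else if axis_index == 2 then [[c, -s, 0], [s, c, 0], [0, 0, 1]]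
    else []  -- Python raises ValueError here; excluded by Pre_

-- ===== PRECONDITION & SPEC =====
-- Pre_ excludes exactly the inputs where A raises ValueError: turns ≠ 0 and an invalid axis index.
def Pre_rotation_about_axis (axis_index : Int) (quarter_turns : Int) : Prop :=
  PySem.Int.mod quarter_turns 4 = 0 ∨ axis_index = 0 ∨ axis_index = 1 ∨ axis_index = 2
instance (axis_index : Int) (quarter_turns : Int) : Decidable (Pre_rotation_about_axis axis_index quarter_turns) := by unfold Pre_rotation_about_axis; infer_instance

def pvWitness_rotation_about_axis : Int × Int := (1, 3)

def Spec_rotation_about_axis (axis_index : Int) (quarter_turns : Int) (out : List (List Int)) : Prop := out = rotation_about_axis_alt axis_index quarter_turns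
instance (axis_index : Int) (quarter_turns : Int) (out : List (List Int)) : Decidable (Spec_rotation_about_axis axis_index quarter_turns out) := by unfold Spec_rotation_about_axis; infer_instance

-- ===== CLAIM (what is proved, stated in full; the proofs are below) =====
def Claim_equal_rotation_about_axis : Prop := ∀ (axis_index : Int) (quarter_turns : Int), Dom_rotation_about_axis axis_index quarter_turns → Pre_rotation_about_axis axis_index quarter_turns → Spec_rotation_about_axis axis_index quarter_turns (rotation_about_axis axis_index quarter_turns)

-- ===== LEMMAS AND PROOFS =====
theorem mod4_cases (q : Int) :
    PySem.Int.mod q 4 = 0 ∨ PySem.Int.mod q 4 = 1 ∨ PySem.Int.mod q 4 = 2 ∨ PySem.Int.mod q 4 = 3 := by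
  rw [PySem.Int.mod_eq_emod_of_pos (by norm_num)]
  omega

-- ===== VERDICT (by name: the statement is the Claim_ definition above) =====
theorem rotation_about_axis_spec : Claim_equal_rotation_about_axis := by
  intro a q _ hpre
  unfold Spec_rotation_about_axis
  rcases mod4_cases q with h | h | h | h
  · have hd : (4:Int) ∣ q := by
      rw [PySem.Int.mod_eq_emod_of_pos (by norm_num)] at h; omega
    simp [rotation_about_axis, rotation_about_axis_alt, identityRot, PySem.List.slice, hd]
  all_goals
    rcases hpre with h0 | h0 | h0 | h0
    case _ => rw [h] at h0; exact absurd h0 (by decide)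
    all_goals
      subst h0
      simp only [rotation_about_axis, rotation_about_axis_alt, h]
      decide
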